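-- pv_equiv track=rewrite | github.com/TaoishTechy/AxiomCivilization | axiomforge_civilization-0.1.py | tao_soft_hard_principle
-- ===== SOURCE A (Python) =====
-- from typing import Any, Dict, List, Tuple
--
-- def tao_soft_hard_principle(mechanisms: List[str]) -> List[str]:
--     """The soft overcomes the hard: prefer flexible over rigid mechanisms"""
--     soft_terms = ["flow", "adapt", "balance", "resonance", "fold", "superposition", "drift"]
--     hard_terms = ["collapse", "break", "fixed", "rigid", "lock", "constraint"]
--
--     soft_count = sum(1 for m in mechanisms if any(term in m.lower() for term in soft_terms))
--     hard_count = sum(1 for m in mechanisms if any(term in m.lower() for term in hard_terms))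
--
--     if hard_count > soft_count and len(mechanisms) > 1:
--         # Replace one hard mechanism with a soft one
--         for i, m in enumerate(mechanisms):
--             if any(term in m.lower() for term in hard_terms):
--                 mechanisms[i] = "adaptive resonance"
--                 break
--
--     return mechanisms
-- ===== SOURCE B (Python) =====
-- def tao_soft_hard_principle(mechanisms):
--     """Divide and conquer: each half reports its signed hard-minus-soft balance,
--     whether it contains a hard mechanism, and itself with its first hard element
--     already replaced; halves combine in O(1) decisions. The replaced list is
--     committed iff balance > 0 and len > 1 (mutates the list in place like A)."""
--     soft_terms = ["flow", "adapt", "balance", "resonance", "fold", "superposition", "drift"]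
--     hard_terms = ["collapse", "break", "fixed", "rigid", "lock", "constraint"]
--
--     def go(ms):
--         n = len(ms)
--         if n == 0:
--             return 0, False, []
--         if n == 1:
--             ml = ms[0].lower()
--             hard = any(t in ml for t in hard_terms)
--             soft = any(t in ml for t in soft_terms)
--             return ((1 if hard else 0) - (1 if soft else 0), hard,
--                     ["adaptive resonance"] if hard else [ms[0]])
--         mid = n // 2
--         left, right = ms[:mid], ms[mid:]
--         bl, hl, rl = go(left)
--         br, hr, rr = go(right)
--         return bl + br, hl or hr, (rl + right if hl else left + rr)
--
--     bal, _, rep = go(mechanisms)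
--     if bal > 0 and len(mechanisms) > 1:
--         mechanisms[:] = rep
--     return mechanisms
-- ===== Notes on version B (the rewrite author's own statement) =====
-- stated objective: alternative
-- what changed: Replaces A's staged linear scans (two counting comprehensions plus an index-based replace loop) by a divide-and-conquer recursion: each half returns its signed hard-minus-soft balance, a has-hard flag and itself with its first hard element already replaced, halves combine with O(1) decisions, and the replaced list is committed iff balance > 0 and len > 1.
import Mathlib
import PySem

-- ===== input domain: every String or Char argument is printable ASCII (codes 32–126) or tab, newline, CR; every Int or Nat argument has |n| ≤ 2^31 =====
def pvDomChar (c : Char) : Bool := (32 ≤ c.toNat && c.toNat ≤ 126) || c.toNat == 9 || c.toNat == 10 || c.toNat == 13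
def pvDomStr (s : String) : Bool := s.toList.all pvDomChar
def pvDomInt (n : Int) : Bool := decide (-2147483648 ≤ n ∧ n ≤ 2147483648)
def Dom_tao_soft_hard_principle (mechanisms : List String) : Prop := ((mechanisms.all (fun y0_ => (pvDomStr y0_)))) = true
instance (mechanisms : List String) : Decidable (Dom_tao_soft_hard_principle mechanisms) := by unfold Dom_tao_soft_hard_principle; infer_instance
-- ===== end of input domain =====

-- B replaces A's staged linear scans by a divide-and-conquer recursion whose halves return
-- (signed hard-minus-soft balance, has-hard flag, half with first hard element replaced);
-- return-value equivalence (both Pythons mutate the list in place).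

-- ===== PORT A =====
def pvSoftTerms : List String := ["flow", "adapt", "balance", "resonance", "fold", "superposition", "drift"]
def pvHardTerms : List String := ["collapse", "break", "fixed", "rigid", "lock", "constraint"]

def pvIsSoft (m : String) : Bool := pvSoftTerms.any (fun t => PySem.Str.isIn t (PySem.Str.lower m))
def pvIsHard (m : String) : Bool := pvHardTerms.any (fun t => PySem.Str.isIn t (PySem.Str.lower m))

-- A's replacement loop: scan, overwrite the first hard mechanism, break
def pvReplaceFirstHard : List String → List String
  | [] => []
  | m :: rest => if pvIsHard m then "adaptive resonance" :: rest else m :: pvReplaceFirstHard rest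

def tao_soft_hard_principle (mechanisms : List String) : List String :=
  let soft_count := (mechanisms.filter (fun m => pvIsSoft m)).length
  let hard_count := (mechanisms.filter (fun m => pvIsHard m)).length
  if hard_count > soft_count ∧ mechanisms.length > 1 then
    pvReplaceFirstHard mechanisms
  else
    mechanisms

-- ===== PORT B =====
-- go: (balance, has-hard, list with first hard replaced) by splitting at the midpoint
def pvGo : List String → Int × Bool × List String
  | [] => (0, false, [])
  | [m] =>
    ((if pvIsHard m then 1 else 0) - (if pvIsSoft m then 1 else 0), pvIsHard m,
     if pvIsHard m then ["adaptive resonance"] else [m])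
  | x :: y :: rest =>
    let n := (x :: y :: rest).length
    let left := (x :: y :: rest).take (n / 2)
    let right := (x :: y :: rest).drop (n / 2)
    let (bl, hl, rl) := pvGo left
    let (br, hr, rr) := pvGo right
    (bl + br, hl || hr, if hl then rl ++ right else left ++ rr)
termination_by l => l.length
decreasing_by
  · simp [List.length_take]; omega
  · simp [List.length_drop]; omega

def tao_soft_hard_principle_alt (mechanisms : List String) : List String :=
  match pvGo mechanisms with
  | (bal, _, rep) => if bal > 0 ∧ mechanisms.length > 1 then rep else mechanisms

-- ===== PRECONDITION & SPEC =====
def Spec_tao_soft_hard_principle (mechanisms : List String) (out : List String) : Prop := out = tao_soft_hard_principle_alt mechanisms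
instance (mechanisms : List String) (out : List String) : Decidable (Spec_tao_soft_hard_principle mechanisms out) := by unfold Spec_tao_soft_hard_principle; infer_instance

-- ===== CLAIM (what is proved, stated in full; the proofs are below) =====
def Claim_equal_tao_soft_hard_principle : Prop := ∀ (mechanisms : List String), Dom_tao_soft_hard_principle mechanisms → Spec_tao_soft_hard_principle mechanisms (tao_soft_hard_principle mechanisms)

-- ===== LEMMAS AND PROOFS =====

/-- Replace-first-hard distributes over append by the left part's has-hard flag. -/
theorem pvRFH_append (a b : List String) :
    pvReplaceFirstHard (a ++ b) =
      if a.any pvIsHard then pvReplaceFirstHard a ++ b else a ++ pvReplaceFirstHard b := by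
  induction a with
  | nil => simp
  | cons x xs ih =>
    by_cases hx : pvIsHard x = true <;>
      simp [pvReplaceFirstHard, hx, ih] <;> split_ifs <;> simp

/-- B's divide-and-conquer computes the signed count difference, the has-hard flag
    and A's replace-first-hard list. -/
theorem pvGo_spec (l : List String) :
    pvGo l = (((l.filter (fun m => pvIsHard m)).length : Int) -
              ((l.filter (fun m => pvIsSoft m)).length : Int),
              l.any (fun m => pvIsHard m), pvReplaceFirstHard l) := by
  fun_induction pvGo l with
  | case1 => simp [pvReplaceFirstHard]
  | case2 m =>
    by_cases h1 : pvIsHard m = true <;> by_cases h2 : pvIsSoft m = true <;>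
      simp [pvReplaceFirstHard, h1, h2]
  | case3 x y rest n left right bl hl rl el br hr rr er ihl ihr =>
    rw [el] at ihl
    rw [er] at ihr
    simp only [Prod.mk.injEq] at ihl ihr
    obtain ⟨hbl, hhl, hrl⟩ := ihl
    obtain ⟨hbr, hhr, hrr⟩ := ihr
    subst hbl hhl hrl hbr hhr hrr
    have hsplit : left ++ right = x :: y :: rest := List.take_append_drop (n / 2) (x :: y :: rest)
    conv_rhs => rw [← hsplit]
    rw [pvRFH_append]
    simp only [List.filter_append, List.any_append, List.length_append, Prod.mk.injEq]
    exact ⟨by push_cast; ring, trivial⟩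

-- ===== VERDICT (by name: the statement is the Claim_ definition above) =====
theorem tao_soft_hard_principle_spec : Claim_equal_tao_soft_hard_principle := by
  intro mechanisms _
  unfold Spec_tao_soft_hard_principle tao_soft_hard_principle tao_soft_hard_principle_alt
  rw [pvGo_spec]
  dsimp only
  split_ifs with h1 h2 h2 <;> first | rfl | (exfalso; omega)
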